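-- pv_equiv track=rewrite | github.com/kiddulu916/BH-framework | stages/active_recon/runners/run_nmap.py | categorize_ports
-- ===== SOURCE A (Python) =====
-- from typing import List, Dict, Any
--
-- def categorize_ports(ports: List[Dict[str, Any]]) -> Dict[str, List[Dict[str, Any]]]:
--     """
--     Categorize ports by service type using expected category keys.
--
--     Args:
--         ports: List of port information dictionaries
--
--     Returns:
--         Dictionary with categorized ports
--     """
--     categories = {
--         "web": [],
--         "database": [],
--         "email": [],
--         "file_transfer": [],
--         "remote_access": [],
--         "dns": [],
--         "other": []
--     }
--
--     web_services = ['http', 'https', 'http-proxy', 'http-alt', 'webcache', 'websm']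
--     database_services = ['mysql', 'postgresql', 'oracle', 'mongodb', 'redis', 'cassandra', 'elasticsearch']
--     email_services = ['smtp', 'pop3', 'imap', 'submission', 'smtps', 'pop3s', 'imaps']
--     file_transfer_services = ['ftp', 'sftp', 'tftp', 'nfs', 'smb', 'cifs']
--     remote_access_services = ['ssh', 'telnet', 'rsh', 'rlogin', 'vnc', 'rdp']
--     dns_services = ['dns', 'domain']
--
--     for port in ports:
--         service = port.get('service', '').lower()
--
--         if service in web_services:
--             categories["web"].append(port)
--         elif service in database_services:
--             categories["database"].append(port)
--         elif service in email_services: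
--             categories["email"].append(port)
--         elif service in file_transfer_services:
--             categories["file_transfer"].append(port)
--         elif service in remote_access_services:
--             categories["remote_access"].append(port)
--         elif service in dns_services:
--             categories["dns"].append(port)
--         else:
--             categories["other"].append(port)
--
--     return categories
-- ===== SOURCE B (Python) =====
-- def categorize_ports(ports):
--     table = [
--         ("web", ['http', 'https', 'http-proxy', 'http-alt', 'webcache', 'websm']),
--         ("database", ['mysql', 'postgresql', 'oracle', 'mongodb', 'redis', 'cassandra', 'elasticsearch']),
--         ("email", ['smtp', 'pop3', 'imap', 'submission', 'smtps', 'pop3s', 'imaps']),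
--         ("file_transfer", ['ftp', 'sftp', 'tftp', 'nfs', 'smb', 'cifs']),
--         ("remote_access", ['ssh', 'telnet', 'rsh', 'rlogin', 'vnc', 'rdp']),
--         ("dns", ['dns', 'domain']),
--     ]
--
--     def category_of(port):
--         service = port.get('service', '').lower()
--         for cat, members in table:
--             if service in members:
--                 return cat
--         return "other"
--
--     return {cat: [p for p in ports if category_of(p) == cat]
--             for cat in [c for c, _ in table] + ["other"]}
-- ===== Notes on version B (the rewrite author's own statement) =====
-- stated objective: alternative
-- what changed: Instead of one pass that dispatches each port through a seven-branch elif cascade into mutable buckets, B makes one filtering pass per category: a category_of helper scans a (category, members) table, and the result dict is built by seven comprehensions selecting the ports whose category equals that key.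
import Mathlib
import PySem

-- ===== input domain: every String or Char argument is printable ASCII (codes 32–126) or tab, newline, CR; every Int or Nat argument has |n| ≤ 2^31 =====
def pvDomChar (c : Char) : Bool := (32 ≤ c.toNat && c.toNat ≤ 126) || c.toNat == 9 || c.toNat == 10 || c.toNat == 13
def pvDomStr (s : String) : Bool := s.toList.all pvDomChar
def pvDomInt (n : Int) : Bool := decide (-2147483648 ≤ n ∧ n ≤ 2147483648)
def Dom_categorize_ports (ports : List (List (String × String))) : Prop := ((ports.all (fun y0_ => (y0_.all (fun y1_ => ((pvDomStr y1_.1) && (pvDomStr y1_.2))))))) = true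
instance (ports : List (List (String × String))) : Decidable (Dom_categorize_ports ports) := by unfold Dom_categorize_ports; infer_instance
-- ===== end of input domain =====

-- B rebuilds the result by one filtering pass per category (a category_of table scan + seven list comprehensions) instead of A's single bucketing pass through an elif cascade (objective: alternative).

-- ===== PORT A =====
def aWeb : List String := ["http", "https", "http-proxy", "http-alt", "webcache", "websm"]
def aDatabase : List String := ["mysql", "postgresql", "oracle", "mongodb", "redis", "cassandra", "elasticsearch"]
def aEmail : List String := ["smtp", "pop3", "imap", "submission", "smtps", "pop3s", "imaps"]
def aFileTransfer : List String := ["ftp", "sftp", "tftp", "nfs", "smb", "cifs"]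
def aRemoteAccess : List String := ["ssh", "telnet", "rsh", "rlogin", "vnc", "rdp"]
def aDns : List String := ["dns", "domain"]

def aInit : PySem.Dict String (List (List (String × String))) :=
  PySem.Dict.ofList
    [("web", []), ("database", []), ("email", []), ("file_transfer", []),
     ("remote_access", []), ("dns", []), ("other", [])]

-- the loop body of A: the elif cascade appending `port` to the chosen bucket
def aStep (cats : PySem.Dict String (List (List (String × String))))
    (port : List (String × String)) : PySem.Dict String (List (List (String × String))) :=
  let service := PySem.Str.lower ((PySem.Dict.mk port).getD "service" "")
  if aWeb.contains service then cats.modify "web" [] (· ++ [port])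
  else if aDatabase.contains service then cats.modify "database" [] (· ++ [port])
  else if aEmail.contains service then cats.modify "email" [] (· ++ [port])
  else if aFileTransfer.contains service then cats.modify "file_transfer" [] (· ++ [port])
  else if aRemoteAccess.contains service then cats.modify "remote_access" [] (· ++ [port])
  else if aDns.contains service then cats.modify "dns" [] (· ++ [port])
  else cats.modify "other" [] (· ++ [port])

def categorize_ports (ports : List (List (String × String))) : List (String × List (List (String × String))) :=
  (ports.foldl aStep aInit).items

-- ===== PORT B =====
def bTable : List (String × List String) :=
  [("web", ["http", "https", "http-proxy", "http-alt", "webcache", "websm"]),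
   ("database", ["mysql", "postgresql", "oracle", "mongodb", "redis", "cassandra", "elasticsearch"]),
   ("email", ["smtp", "pop3", "imap", "submission", "smtps", "pop3s", "imaps"]),
   ("file_transfer", ["ftp", "sftp", "tftp", "nfs", "smb", "cifs"]),
   ("remote_access", ["ssh", "telnet", "rsh", "rlogin", "vnc", "rdp"]),
   ("dns", ["dns", "domain"])]

-- the 'for cat, members in table: if service in members: return cat' loop of category_of
def bFind (service : String) : List (String × List String) → String
  | [] => "other"
  | (cat, members) :: rest => if members.contains service then cat else bFind service rest

def bCategoryOf (port : List (String × String)) : String :=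
  bFind (PySem.Str.lower ((PySem.Dict.mk port).getD "service" "")) bTable

-- {cat: [p for p in ports if category_of(p) == cat] for cat in [c for c, _ in table] + ["other"]}
def categorize_ports_alt (ports : List (List (String × String))) : List (String × List (List (String × String))) :=
  (bTable.map (·.1) ++ ["other"]).map
    (fun cat => (cat, ports.filter (fun p => bCategoryOf p == cat)))

-- ===== PRECONDITION & SPEC =====
def Spec_categorize_ports (ports : List (List (String × String))) (out : List (String × List (List (String × String)))) : Prop := out = categorize_ports_alt ports
instance (ports : List (List (String × String))) (out : List (String × List (List (String × String)))) : Decidable (Spec_categorize_ports ports out) := by unfold Spec_categorize_ports; infer_instance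

-- ===== CLAIM =====
def Claim_equal_categorize_ports : Prop := ∀ (ports : List (List (String × String))), Dom_categorize_ports ports → Spec_categorize_ports ports (categorize_ports ports)

-- ===== LEMMAS AND PROOFS =====

def pvSvc (port : List (String × String)) : String :=
  PySem.Str.lower ((PySem.Dict.mk port).getD "service" "")

def pvKeys : List String :=
  ["web", "database", "email", "file_transfer", "remote_access", "dns", "other"]

-- A's cascade written as a single key choice
def aKey (service : String) : String :=
  if aWeb.contains service then "web"
  else if aDatabase.contains service then "database"
  else if aEmail.contains service then "email"
  else if aFileTransfer.contains service then "file_transfer"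
  else if aRemoteAccess.contains service then "remote_access"
  else if aDns.contains service then "dns"
  else "other"

lemma aKey_eq_bFind (s : String) : aKey s = bFind s bTable := rfl

lemma aKey_mem_pvKeys (s : String) : aKey s ∈ pvKeys := by
  unfold aKey pvKeys; split_ifs <;> simp

lemma aStep_eq_modify (cats : PySem.Dict String (List (List (String × String))))
    (port : List (String × String)) :
    aStep cats port = cats.modify (aKey (pvSvc port)) [] (· ++ [port]) := by
  simp only [aStep, aKey, pvSvc]
  split_ifs <;> rfl

-- A's fold, item by item: each key of pvKeys paired with the filter of the ports it receives
lemma items_foldl (ports : List (List (String × String))) :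
    (ports.foldl aStep aInit).items =
      pvKeys.map (fun c => (c, ports.filter (fun p => aKey (pvSvc p) == c))) := by
  have hstep : aStep = fun d p => d.modify (aKey (pvSvc p)) [] (· ++ [p]) :=
    funext fun d => funext fun p => aStep_eq_modify d p
  have hmap : ports.foldl (fun d p => d.modify (aKey (pvSvc p)) [] (· ++ [p])) aInit
      = (ports.map (fun p => (aKey (pvSvc p), p))).foldl
          (fun d q => d.modify q.1 [] (· ++ [q.2])) aInit := by
    rw [List.foldl_map]
  rw [hstep, hmap]
  set L := ports.map (fun p => (aKey (pvSvc p), p)) with hL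
  set D := L.foldl (fun d q => d.modify q.1 [] (· ++ [q.2])) aInit with hD
  have hkeys0 : aInit.keys = pvKeys := by decide
  have hmemL : ∀ x ∈ L.map (·.1), x ∈ aInit.keys := by
    intro x hx
    rw [hkeys0]
    simp only [hL, List.map_map, List.mem_map] at hx
    obtain ⟨p, _, hp⟩ := hx
    exact hp ▸ aKey_mem_pvKeys _
  
  have hkeys : D.keys = pvKeys := by
    rw [hD, PySem.Dict.keys_foldl_modify_key,
        PySem.Set.update_eq_append_filter, hkeys0]
    have : (PySem.Set.ofList (L.map (·.1))).filter
        (fun y => !(PySem.Set.contains pvKeys y)) = [] := by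
      rw [List.filter_eq_nil_iff]
      intro a ha
      rw [PySem.Set.mem_ofList] at ha
      have h2 : a ∈ pvKeys := hkeys0 ▸ hmemL a ha
      simpa using h2
    rw [this, List.append_nil]
  have hnd : D.keys.Nodup := by rw [hkeys]; decide
  rw [PySem.Dict.items_eq_map_keys D hnd ([] : List (List (String × String))), hkeys]
  apply List.map_congr_left
  intro c hc
  have hgetD : D.getD c [] = aInit.getD c [] ++ (L.filter (fun q => q.1 == c)).map (·.2) := by
    rw [hD]; exact PySem.Dict.getD_foldl_modify_append L aInit c
  have hinit : aInit.getD c [] = [] := by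
    fin_cases hc <;> decide
  rw [hgetD, hinit, List.nil_append, hL, List.filter_map, List.map_map]
  simp only [Function.comp_def]
  simp

-- ===== VERDICT =====
theorem categorize_ports_spec : Claim_equal_categorize_ports := by
  intro ports _
  unfold Spec_categorize_ports categorize_ports categorize_ports_alt
  rw [items_foldl]
  have : bTable.map (·.1) ++ ["other"] = pvKeys := by decide
  rw [this]
  apply List.map_congr_left
  intro c _
  simp only [bCategoryOf, ← aKey_eq_bFind, pvSvc]
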